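-- pv_equiv track=rewrite | github.com/andresroliveira/Unicamp | MC102/lab10.py | verificaDiagonal
-- ===== SOURCE A (Python) =====
-- def verificaDiagonal(grid):
-- 	f = 0
-- 	s = 0
-- 	n = len(grid)
--
-- 	for i in range(n):
-- 		if grid[i][i] == -1:
-- 			f += 1
-- 		if grid[i][n - i - 1] == -1:
-- 			s += 1
--
-- 	return f == n or s == n
-- ===== SOURCE B (Python) =====
-- def verificaDiagonal(grid):
--     n = len(grid)
--
--     def diags(rows, i):
--         if not rows:
--             return [], []
--         m, a = diags(rows[1:], i + 1)
--         return [rows[0][i]] + m, [rows[0][n - i - 1]] + a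
--
--     main, anti = diags(grid, 0)
--     target = [-1] * n
--     return main == target or anti == target
-- ===== Notes on version B (the rewrite author's own statement) =====
-- stated objective: alternative
-- what changed: Instead of counting matches in one index loop, B recursively peels rows to materialise both diagonals as lists, then decides by comparing each whole list against the literal [-1]*n.
import Mathlib
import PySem

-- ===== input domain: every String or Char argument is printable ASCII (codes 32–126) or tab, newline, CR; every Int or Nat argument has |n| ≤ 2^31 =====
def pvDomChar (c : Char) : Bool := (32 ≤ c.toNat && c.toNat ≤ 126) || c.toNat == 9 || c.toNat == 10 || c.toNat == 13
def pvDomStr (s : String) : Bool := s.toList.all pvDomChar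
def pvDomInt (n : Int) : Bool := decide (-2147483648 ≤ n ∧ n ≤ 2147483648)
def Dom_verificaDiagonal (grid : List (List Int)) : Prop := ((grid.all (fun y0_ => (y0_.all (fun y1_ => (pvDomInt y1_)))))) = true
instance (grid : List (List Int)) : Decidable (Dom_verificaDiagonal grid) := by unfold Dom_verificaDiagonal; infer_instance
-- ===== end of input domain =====

-- B replaces A's single counting loop by a recursive pass that materialises both diagonals
-- as lists and compares each against the literal [-1]*n (objective: alternative; same cost).

-- ===== PORT A =====
def verificaDiagonal (grid : List (List Int)) : Bool :=
  let n : Int := grid.length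
  let fs :=
    (PySem.List.pyRange 0 n 1).foldl
      (fun (fs : Int × Int) i =>
        (if PySem.List.pyGetD (PySem.List.pyGetD grid i []) i 0 == -1 then fs.1 + 1 else fs.1,
         if PySem.List.pyGetD (PySem.List.pyGetD grid i []) (n - i - 1) 0 == -1 then fs.2 + 1 else fs.2))
      (0, 0)
  fs.1 == n || fs.2 == n

-- ===== PORT B =====
-- helper 'diags' of Source B: recursion on the rows, carrying the running index i
def vdDiags (n : Int) : List (List Int) → Int → List Int × List Int
  | [], _ => ([], [])
  | r :: rest, i =>
    let p := vdDiags n rest (i + 1)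
    (PySem.List.pyGetD r i 0 :: p.1, PySem.List.pyGetD r (n - i - 1) 0 :: p.2)

def verificaDiagonal_alt (grid : List (List Int)) : Bool :=
  let n : Int := grid.length
  let p := vdDiags n grid 0
  let target : List Int := List.replicate grid.length (-1)
  (p.1 == target) || (p.2 == target)

-- ===== PRECONDITION & SPEC =====
-- Pre_ excludes ragged grids on which Python A raises IndexError (a diagonal index falls
-- outside some row); A returns normally exactly when every row i is longer than both i
-- and len(grid)-1-i.
def Pre_verificaDiagonal (grid : List (List Int)) : Prop :=
  ∀ p ∈ grid.zipIdx, p.2 < p.1.length ∧ grid.length - 1 - p.2 < p.1.length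
instance (grid : List (List Int)) : Decidable (Pre_verificaDiagonal grid) := by unfold Pre_verificaDiagonal; infer_instance
def pvWitness_verificaDiagonal : List (List Int) := [[-1, 2], [3, -1]]

def Spec_verificaDiagonal (grid : List (List Int)) (out : Bool) : Prop := out = verificaDiagonal_alt grid
instance (grid : List (List Int)) (out : Bool) : Decidable (Spec_verificaDiagonal grid out) := by unfold Spec_verificaDiagonal; infer_instance

-- ===== CLAIM (what is proved, stated in full; the proofs are below) =====
def Claim_equal_verificaDiagonal : Prop := ∀ (grid : List (List Int)), Dom_verificaDiagonal grid → Pre_verificaDiagonal grid → Spec_verificaDiagonal grid (verificaDiagonal grid)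

-- ===== LEMMAS AND PROOFS =====

-- Splitting A's paired counting fold into two independent counts.
theorem pv_foldl_pair_count (l : List Int) (pf ps : Int → Bool) (a b : Int) :
    l.foldl
      (fun (fs : Int × Int) i =>
        (if pf i then fs.1 + 1 else fs.1, if ps i then fs.2 + 1 else fs.2)) (a, b)
      = (a + l.countP pf, b + l.countP ps) := by
  induction l generalizing a b with
  | nil => simp
  | cons x l ih =>
    simp only [List.foldl_cons, List.countP_cons, ih, Prod.mk.injEq]
    constructor <;> (split_ifs <;> push_cast <;> ring)

-- An Int count over a list equals the list's length (given as n) iff the predicate holds everywhere.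
theorem pv_count_eq_iff (l : List Int) (p : Int → Bool) (n : Int) (h : (l.length : Int) = n) :
    (((l.countP p : Int) == n)) = l.all p := by
  subst h
  rcases hall : l.all p with _ | _
  · simp only [beq_eq_false_iff_ne, ne_eq, Int.natCast_inj]
    intro hc
    have hall2 := (List.countP_eq_length (p := p) (l := l)).mp hc
    obtain ⟨x, hx, hpx⟩ := List.all_eq_false.mp hall
    exact hpx (hall2 x hx)
  · have hc : l.countP p = l.length :=
      List.countP_eq_length.mpr (by simpa [List.all_eq_true] using hall)
    simp [hc]

-- B's recursive helper builds exactly the per-row maps over enumerate.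
theorem pv_vdDiags_eq (n : Int) (rows : List (List Int)) (i : Int) :
    vdDiags n rows i =
      ((PySem.List.enumerate rows i).map (fun p => PySem.List.pyGetD p.2 p.1 0),
       (PySem.List.enumerate rows i).map (fun p => PySem.List.pyGetD p.2 (n - p.1 - 1) 0)) := by
  induction rows generalizing i with
  | nil => simp [vdDiags, PySem.List.enumerate_nil]
  | cons r rest ih => simp [vdDiags, PySem.List.enumerate_cons, ih]

-- Comparing a list with [-1]*k (k = its own length) is the same as 'all elements are -1'.
theorem pv_beq_replicate (l : List Int) (k : Nat) (h : l.length = k) :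
    (l == List.replicate k (-1)) = l.all (· == -1) := by
  subst h
  rcases hall : l.all (· == -1) with _ | _
  · obtain ⟨x, hx, hpx⟩ := List.all_eq_false.mp hall
    simp only [beq_eq_false_iff_ne, ne_eq]
    intro he
    rw [List.eq_replicate_iff] at he
    exact hpx (by simp [he.2 x hx])
  · have : l = List.replicate l.length (-1) :=
      List.eq_replicate_iff.mpr ⟨rfl, by
        intro x hx
        have := (List.all_eq_true.mp hall) x hx
        simpa using this⟩
    simp [← this]

theorem verificaDiagonal_eq_alt (grid : List (List Int)) :
    verificaDiagonal grid = verificaDiagonal_alt grid := by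
  unfold verificaDiagonal verificaDiagonal_alt
  dsimp only
  rw [pv_foldl_pair_count, pv_vdDiags_eq]
  dsimp only
  rw [pv_beq_replicate _ _ (by simp [PySem.List.length_enumerate]),
      pv_beq_replicate _ _ (by simp [PySem.List.length_enumerate]),
      PySem.List.enumerate_eq_map_pyRange (xs := grid) (d := [])]
  simp only [List.all_map, PySem.List.len_eq, zero_add]
  rw [pv_count_eq_iff _ _ _ (by simp [PySem.List.length_pyRange_one]),
      pv_count_eq_iff _ _ _ (by simp [PySem.List.length_pyRange_one])]
  rfl

-- ===== VERDICT (by name: the statement is the Claim_ definition above) =====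
theorem verificaDiagonal_spec : Claim_equal_verificaDiagonal := by
  intro grid _ _
  exact verificaDiagonal_eq_alt grid
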